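-- pv_equiv track=rewrite | github.com/Abhi-2526/Maze-Generator-Gazebo | maze_generator.py | adjust_borders
-- ===== SOURCE A (Python) =====
-- def adjust_borders(border):
--     adjusted = []
--     for i in range(len(border)):
--         if i > 0 and border[i] == '|' and border[i-1] == '|':
--             adjusted.append('-')
--         else:
--             adjusted.append(border[i])
--     return ''.join(adjusted)
-- ===== SOURCE B (Python) =====
-- def adjust_borders(border):
--     out = []
--     i = 0
--     n = len(border)
--     while i < n:
--         if border[i] != '|':
--             out.append(border[i])
--             i += 1
--         else:
--             k = i + 1
--             while k < n and border[k] == '|':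
--                 k += 1
--             out.append('|' + '-' * (k - i - 1))
--             i = k
--     return ''.join(out)
-- ===== Notes on version B (the rewrite author's own statement) =====
-- stated objective: alternative
-- what changed: Replaces A's per-index loop testing the previous character with a run-length scan: an outer loop over maximal runs of '|' that emits '|' followed by '-'*(k-1) as one block and jumps past the run.
import Mathlib
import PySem

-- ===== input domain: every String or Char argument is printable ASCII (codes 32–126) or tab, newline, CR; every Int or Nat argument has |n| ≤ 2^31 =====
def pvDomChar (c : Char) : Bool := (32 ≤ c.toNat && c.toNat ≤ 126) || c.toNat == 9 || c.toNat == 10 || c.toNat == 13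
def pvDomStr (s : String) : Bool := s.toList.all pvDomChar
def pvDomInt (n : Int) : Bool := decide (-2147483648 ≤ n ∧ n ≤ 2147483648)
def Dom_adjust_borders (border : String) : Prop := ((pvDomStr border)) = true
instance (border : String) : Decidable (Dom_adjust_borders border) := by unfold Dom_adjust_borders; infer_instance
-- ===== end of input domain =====

-- B replaces A's per-index previous-character test with a run-length scan over maximal '|' runs, emitting '|' + '-'*(k-1) per run (alternative decomposition, same cost).

-- ===== PORT A =====
def adjust_borders (border : String) : String :=
  let cs := border.toList
  let adjusted := (PySem.List.pyRange 0 cs.length 1).foldl (fun acc i =>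
    if 0 < i ∧ PySem.List.pyGetD cs i ' ' = '|' ∧ PySem.List.pyGetD cs (i-1) ' ' = '|'
    then acc ++ ['-']
    else acc ++ [PySem.List.pyGetD cs i ' ']) ([] : List Char)
  String.mk adjusted

-- ===== PORT B =====
-- the inner `while k < n and border[k] == '|'` run scan of Source B
def pvCountPipes : List Char → Nat
  | [] => 0
  | c :: r => if c = '|' then 1 + pvCountPipes r else 0

-- the outer while loop of Source B over the remaining characters
def pvRunGo : List Char → List Char
  | [] => []
  | c :: rest =>
    if c = '|' then
      let k := pvCountPipes rest
      '|' :: (List.replicate k '-' ++ pvRunGo (rest.drop k))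
    else
      c :: pvRunGo rest
termination_by cs => cs.length
decreasing_by
  · simpa using Nat.lt_succ_of_le (List.length_drop (l := rest) (i := pvCountPipes rest) ▸ Nat.sub_le _ _)
  · simp

def adjust_borders_alt (border : String) : String :=
  String.mk (pvRunGo border.toList)

-- ===== PRECONDITION & SPEC =====
def Spec_adjust_borders (border : String) (out : String) : Prop := out = adjust_borders_alt border
instance (border : String) (out : String) : Decidable (Spec_adjust_borders border out) := by unfold Spec_adjust_borders; infer_instance

-- ===== CLAIM (what is proved, stated in full; the proofs are below) =====
def Claim_equal_adjust_borders : Prop := ∀ (border : String), Dom_adjust_borders border → Spec_adjust_borders border (adjust_borders border)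

-- ===== LEMMAS AND PROOFS =====

-- A's loop with a tracked previous character (proof-side reformulation of A)
def pvPrevGo : Char → List Char → List Char
  | _, [] => []
  | p, c :: r => (if p = '|' ∧ c = '|' then '-' else c) :: pvPrevGo c r

theorem foldl_append_singleton {α β : Type} (l : List α) (g : α → β) (init : List β) :
    l.foldl (fun acc i => acc ++ [g i]) init = init ++ l.map g := by
  induction l generalizing init with
  | nil => simp
  | cons a l ih => simp [ih]

theorem adjust_lists_eq (cs : List Char) :
    (PySem.List.pyRange 0 cs.length 1).foldl (fun acc i =>
      if 0 < i ∧ PySem.List.pyGetD cs i ' ' = '|' ∧ PySem.List.pyGetD cs (i-1) ' ' = '|'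
      then acc ++ ['-']
      else acc ++ [PySem.List.pyGetD cs i ' ']) ([] : List Char)
    = ((' ' :: cs).zip cs).map (fun pc => if pc.1 = '|' ∧ pc.2 = '|' then '-' else pc.2) := by
  have hfun : (fun (acc : List Char) (i : Int) =>
      if 0 < i ∧ PySem.List.pyGetD cs i ' ' = '|' ∧ PySem.List.pyGetD cs (i-1) ' ' = '|'
      then acc ++ ['-']
      else acc ++ [PySem.List.pyGetD cs i ' '])
    = (fun (acc : List Char) (i : Int) => acc ++
      [if 0 < i ∧ PySem.List.pyGetD cs i ' ' = '|' ∧ PySem.List.pyGetD cs (i-1) ' ' = '|'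
       then '-' else PySem.List.pyGetD cs i ' ']) := by
    funext acc i; split_ifs <;> rfl
  rw [hfun, PySem.List.pyRange_one, List.foldl_map, foldl_append_singleton]
  simp only [List.nil_append, sub_zero, zero_add, Int.toNat_natCast]
  have hget : ∀ (j : Nat) (hj : j < cs.length),
      PySem.List.pyGetD cs ((j : Int)) ' ' = cs[j]'hj := by
    intro j hj
    rw [PySem.List.pyGetD_eq_getElem]
    · simp
    · exact Int.natCast_nonneg j
    · exact_mod_cast hj
  apply List.ext_getElem
  · simp
  · intro k h1 h2
    have hk : k < cs.length := by simpa using h1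
    rw [List.getElem_map, List.getElem_range, List.getElem_map, List.getElem_zip]
    cases k with
    | zero =>
      rw [hget 0 hk]
      have hsp : (' ' : Char) ≠ '|' := by decide
      simp [hsp]
    | succ j =>
      have hj : j < cs.length := Nat.lt_of_succ_lt hk
      have h1' : ((((j+1 : Nat)) : Int)) - 1 = (j : Int) := by push_cast; ring
      rw [hget (j+1) hk, h1', hget j hj]
      have hpos : (0:Int) < ((j+1 : Nat) : Int) := by positivity
      simp only [List.getElem_cons_succ, hpos, true_and]
      split_ifs with ha hb hb <;> first | rfl | (exfalso; tauto)

theorem zip_eq_prevGo (p : Char) (cs : List Char) :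
    ((p :: cs).zip cs).map (fun pc => if pc.1 = '|' ∧ pc.2 = '|' then '-' else pc.2)
    = pvPrevGo p cs := by
  induction cs generalizing p with
  | nil => rfl
  | cons c r ih => simp [pvPrevGo, ← ih c]

-- joint invariant: outside a run pvPrevGo agrees with pvRunGo; inside a run ('|' just seen)
-- it emits '-' for the remaining pipes of the run, then resumes pvRunGo
theorem prevGo_eq_runGo (cs : List Char) :
    (∀ p, p ≠ '|' → pvPrevGo p cs = pvRunGo cs) ∧
    (pvPrevGo '|' cs =
      List.replicate (pvCountPipes cs) '-' ++ pvRunGo (cs.drop (pvCountPipes cs))) := by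
  induction cs with
  | nil => exact ⟨fun _ _ => by simp [pvPrevGo, pvRunGo], by simp [pvPrevGo, pvRunGo, pvCountPipes]⟩
  | cons c r ih =>
    constructor
    · intro p hp
      by_cases hc : c = '|'
      · subst hc
        simp [pvPrevGo, pvRunGo, hp, ih.2]
      · simp [pvPrevGo, pvRunGo, hc, ih.1 c hc]
    · by_cases hc : c = '|'
      · subst hc
        simp [pvPrevGo, pvCountPipes, ih.2, List.replicate_succ, Nat.add_comm,
          List.drop_succ_cons]
      · simp [pvPrevGo, pvRunGo, pvCountPipes, hc, ih.1 c hc]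

theorem adjust_borders_eq (border : String) :
    adjust_borders border = adjust_borders_alt border := by
  simp only [adjust_borders, adjust_borders_alt]
  rw [adjust_lists_eq, zip_eq_prevGo, (prevGo_eq_runGo border.toList).1 ' ' (by decide)]

-- ===== VERDICT (by name: the statement is the Claim_ definition above) =====
theorem adjust_borders_spec : Claim_equal_adjust_borders := by
  intro border _
  unfold Spec_adjust_borders
  exact adjust_borders_eq border
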